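-- pv_equiv track=rewrite | github.com/naizhengtan/CobraSAT | src/formula/cnf.py | make_clause_lines
-- ===== SOURCE A (Python) =====
-- def make_clause_lines(cnf):
--     seen = {}
--     var_count = 0
--     clause_lines = []
--
--     for clause in cnf:
--         line = []
--         for name, is_positive in clause:
--             if name not in seen:
--                 var_count += 1
--                 seen[name] = var_count
--             num = seen[name] if is_positive else -seen[name]
--             line.append(num)
--         line.append(0)
--         clause_lines.append(line)
--
--     return clause_lines, var_count
-- ===== SOURCE B (Python) =====
-- def make_clause_lines(cnf):
--     # pass 1: number variables by first appearance
--     seen = {}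
--     for clause in cnf:
--         for name, _ in clause:
--             if name not in seen:
--                 seen[name] = len(seen) + 1
--     # pass 2: emit the numbered clause lines
--     clause_lines = [[(seen[name] if is_positive else -seen[name])
--                      for name, is_positive in clause] + [0]
--                     for clause in cnf]
--     return clause_lines, len(seen)
-- ===== Notes on version B (the rewrite author's own statement) =====
-- stated objective: idiomatic
-- what changed: B splits A's single interleaved loop into two passes: one loop that only builds the first-appearance numbering dict (using len(seen)+1 instead of a separate counter), then a list comprehension that maps each clause through the finished dict; A's mutable line/counter state disappears.
import Mathlib
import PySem

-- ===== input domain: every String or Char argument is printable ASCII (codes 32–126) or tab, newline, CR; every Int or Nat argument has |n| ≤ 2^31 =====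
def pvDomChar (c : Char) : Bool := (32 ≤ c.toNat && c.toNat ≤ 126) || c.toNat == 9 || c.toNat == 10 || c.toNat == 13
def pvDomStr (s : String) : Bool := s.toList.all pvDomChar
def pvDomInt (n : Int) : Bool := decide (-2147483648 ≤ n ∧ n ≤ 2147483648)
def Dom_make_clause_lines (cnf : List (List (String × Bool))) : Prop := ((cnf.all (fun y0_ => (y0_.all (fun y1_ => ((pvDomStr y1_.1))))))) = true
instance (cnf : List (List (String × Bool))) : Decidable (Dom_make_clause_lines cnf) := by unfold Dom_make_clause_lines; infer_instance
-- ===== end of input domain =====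

-- B replaces A's single interleaved loop (counter + per-clause line building) by two passes:
-- build the first-appearance numbering dict, then map each clause through it (idiomatic, same cost).

-- ===== PORT A =====
-- one literal of A's inner loop body: update (seen, var_count), append num to line
def mclStepA (q : PySem.Dict String Int × Int × List Int) (lit : String × Bool) :
    PySem.Dict String Int × Int × List Int :=
  let seen := if q.1.contains lit.1 then q.1 else q.1.insert lit.1 (q.2.1 + 1)
  let vc := if q.1.contains lit.1 then q.2.1 else q.2.1 + 1
  let num := if lit.2 then seen.getD lit.1 0 else -(seen.getD lit.1 0)
  (seen, vc, q.2.2 ++ [num])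

def make_clause_lines (cnf : List (List (String × Bool))) : List (List Int) × Int :=
  let st := cnf.foldl
    (fun (st : PySem.Dict String Int × Int × List (List Int)) clause =>
      let r := clause.foldl mclStepA (st.1, st.2.1, ([] : List Int))
      (r.1, r.2.1, st.2.2 ++ [r.2.2 ++ [0]]))
    (PySem.Dict.empty, 0, [])
  (st.2.2, st.2.1)

-- ===== PORT B =====
-- pass 1: first-appearance numbering (seen[name] = len(seen) + 1 on first sight)
def mclStepB (seen : PySem.Dict String Int) (lit : String × Bool) : PySem.Dict String Int :=
  if seen.contains lit.1 then seen else seen.insert lit.1 ((seen.size : Int) + 1)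

def mclSeen (cnf : List (List (String × Bool))) : PySem.Dict String Int :=
  cnf.foldl (fun seen clause => clause.foldl mclStepB seen) PySem.Dict.empty

def make_clause_lines_alt (cnf : List (List (String × Bool))) : List (List Int) × Int :=
  let seen := mclSeen cnf
  (cnf.map (fun clause =>
      clause.map (fun lit => if lit.2 then seen.getD lit.1 0 else -(seen.getD lit.1 0)) ++ [0]),
   (seen.size : Int))

-- ===== PRECONDITION & SPEC =====
def Spec_make_clause_lines (cnf : List (List (String × Bool))) (out : List (List Int) × Int) : Prop := out = make_clause_lines_alt cnf
instance (cnf : List (List (String × Bool))) (out : List (List Int) × Int) : Decidable (Spec_make_clause_lines cnf out) := by unfold Spec_make_clause_lines; infer_instance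

-- ===== CLAIM (what is proved, stated in full; the proofs are below) =====
def Claim_equal_make_clause_lines : Prop := ∀ (cnf : List (List (String × Bool))), Dom_make_clause_lines cnf → Spec_make_clause_lines cnf (make_clause_lines cnf)

-- ===== LEMMAS AND PROOFS =====

-- B's step never changes an existing binding
theorem mclStepB_mono (seen : PySem.Dict String Int) (lit : String × Bool) (k : String) (v : Int)
    (h : seen.get? k = some v) : (mclStepB seen lit).get? k = some v := by
  unfold mclStepB
  split_ifs with hc
  · exact h
  · have hk : k ≠ lit.1 := by
      intro he; subst he
      rw [PySem.Dict.contains_eq_isSome_get?, h] at hc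
      simp at hc
    rw [PySem.Dict.get?_insert_of_ne _ _ hk, h]

theorem mclClauseB_mono (clause : List (String × Bool)) (seen : PySem.Dict String Int)
    (k : String) (v : Int) (h : seen.get? k = some v) :
    (clause.foldl mclStepB seen).get? k = some v := by
  induction clause generalizing seen with
  | nil => exact h
  | cons lit rest ih => exact ih _ (mclStepB_mono seen lit k v h)

theorem mclCnfB_mono (cnf : List (List (String × Bool))) (seen : PySem.Dict String Int)
    (k : String) (v : Int) (h : seen.get? k = some v) :
    (cnf.foldl (fun s c => c.foldl mclStepB s) seen).get? k = some v := by
  induction cnf generalizing seen with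
  | nil => exact h
  | cons c rest ih => exact ih _ (mclClauseB_mono c seen k v h)

-- B's step always leaves the literal's name bound
theorem mclStepB_contains (seen : PySem.Dict String Int) (lit : String × Bool) :
    ∃ v, (mclStepB seen lit).get? lit.1 = some v := by
  unfold mclStepB
  split_ifs with hc
  · rw [PySem.Dict.contains_eq_isSome_get?, Option.isSome_iff_exists] at hc
    exact hc
  · exact ⟨_, PySem.Dict.get?_insert_self _ _ _⟩

-- inner loop of A = B's step fold, with values read from any extension S of the folded dict
theorem mclInner (S : PySem.Dict String Int) (clause : List (String × Bool))
    (seen : PySem.Dict String Int) (line : List Int)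
    (hS : ∀ k v, (clause.foldl mclStepB seen).get? k = some v → S.get? k = some v) :
    clause.foldl mclStepA (seen, (seen.size : Int), line)
      = (clause.foldl mclStepB seen, ((clause.foldl mclStepB seen).size : Int),
         line ++ clause.map (fun lit => if lit.2 then S.getD lit.1 0 else -(S.getD lit.1 0))) := by
  induction clause generalizing seen line with
  | nil => simp
  | cons lit rest ih =>
    obtain ⟨w, hw⟩ := mclStepB_contains seen lit
    have hwS : S.get? lit.1 = some w := by
      apply hS; exact mclClauseB_mono rest _ _ _ hw
    have hstep : mclStepA (seen, (seen.size : Int), line) lit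
        = (mclStepB seen lit, ((mclStepB seen lit).size : Int),
           line ++ [if lit.2 then S.getD lit.1 0 else -(S.getD lit.1 0)]) := by
      have hval : (mclStepB seen lit).getD lit.1 0 = S.getD lit.1 0 := by
        rw [PySem.Dict.getD_eq_get?_getD, PySem.Dict.getD_eq_get?_getD, hw, hwS]
      unfold mclStepA mclStepB
      unfold mclStepB at hval
      by_cases hc : seen.contains lit.1
      · simp only [hc, if_true] at hval ⊢
        rw [hval]
      · simp only [hc, Bool.false_eq_true, if_false] at hval ⊢
        rw [hval, PySem.Dict.size_insert]
        simp [hc]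
    simp only [List.foldl_cons, hstep, List.map_cons]
    rw [ih (mclStepB seen lit) _ (by simpa using hS)]
    simp

theorem mclOuter (S : PySem.Dict String Int) (cnf : List (List (String × Bool)))
    (seen : PySem.Dict String Int) (acc : List (List Int))
    (hS : ∀ k v, (cnf.foldl (fun s c => c.foldl mclStepB s) seen).get? k = some v → S.get? k = some v) :
    cnf.foldl
      (fun (st : PySem.Dict String Int × Int × List (List Int)) clause =>
        let r := clause.foldl mclStepA (st.1, st.2.1, ([] : List Int))
        (r.1, r.2.1, st.2.2 ++ [r.2.2 ++ [0]]))
      (seen, (seen.size : Int), acc)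
      = (cnf.foldl (fun s c => c.foldl mclStepB s) seen,
         ((cnf.foldl (fun s c => c.foldl mclStepB s) seen).size : Int),
         acc ++ cnf.map (fun clause =>
           clause.map (fun lit => if lit.2 then S.getD lit.1 0 else -(S.getD lit.1 0)) ++ [0])) := by
  induction cnf generalizing seen acc with
  | nil => simp
  | cons c rest ih =>
    have hc : ∀ k v, (c.foldl mclStepB seen).get? k = some v → S.get? k = some v := by
      intro k v h; exact hS k v (mclCnfB_mono rest _ _ _ h)
    simp only [List.foldl_cons, List.map_cons]
    rw [mclInner S c seen [] hc]
    simp only []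
    rw [ih (c.foldl mclStepB seen) _ (by simpa using hS)]
    simp

-- ===== VERDICT (by name: the statement is the Claim_ definition above) =====
theorem make_clause_lines_spec : Claim_equal_make_clause_lines := by
  intro cnf _
  have h := mclOuter (cnf.foldl (fun s c => c.foldl mclStepB s) PySem.Dict.empty) cnf
      PySem.Dict.empty [] (fun _ _ hx => hx)
  rw [show (((PySem.Dict.empty : PySem.Dict String Int).size : Int)) = 0 from by
        rw [PySem.Dict.size_empty]; rfl] at h
  unfold Spec_make_clause_lines make_clause_lines make_clause_lines_alt mclSeen
  simp only [h, List.nil_append]
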